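-- pv_equiv track=rewrite | github.com/iamthemag/smartbag-location-tracker | configure-bag-items-improved.py | analyze_item_usage
-- ===== SOURCE A (Python) =====
-- from collections import defaultdict
--
-- def analyze_item_usage(week_items):
--     """Analyze which items are used on multiple days"""
--     item_usage = defaultdict(list)  # item -> list of days
--
--     for day, items in week_items.items():
--         for item in items:
--             item_usage[item].append(day)
--
--     # Categorize items
--     unique_items = {}  # item -> single day
--     shared_items = {}  # item -> list of days
--
--     for item, days in item_usage.items():
--         if len(days) == 1:
--             unique_items[item] = days[0]
--         else:
--             shared_items[item] = days
--
--     return unique_items, shared_items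
-- ===== SOURCE B (Python) =====
-- def analyze_item_usage(week_items):
--     """Analyze which items are used on multiple days"""
--     unique_items = {}
--     shared_items = {}
--     # distinct items in first-seen order, then one rescan per item (no item->days index is built)
--     for item in dict.fromkeys(it for items in week_items.values() for it in items):
--         days = [day for day, items in week_items.items() for it in items if it == item]
--         if len(days) == 1:
--             unique_items[item] = days[0]
--         else:
--             shared_items[item] = days
--     return unique_items, shared_items
-- ===== Notes on version B (the rewrite author's own statement) =====
-- stated objective: alternative
-- what changed: B drops A's defaultdict item->days index and its second categorizing pass: it iterates the distinct items (dict.fromkeys of the flattened values) and rescans week_items once per item to collect that item's days, classifying it immediately.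
import Mathlib
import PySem

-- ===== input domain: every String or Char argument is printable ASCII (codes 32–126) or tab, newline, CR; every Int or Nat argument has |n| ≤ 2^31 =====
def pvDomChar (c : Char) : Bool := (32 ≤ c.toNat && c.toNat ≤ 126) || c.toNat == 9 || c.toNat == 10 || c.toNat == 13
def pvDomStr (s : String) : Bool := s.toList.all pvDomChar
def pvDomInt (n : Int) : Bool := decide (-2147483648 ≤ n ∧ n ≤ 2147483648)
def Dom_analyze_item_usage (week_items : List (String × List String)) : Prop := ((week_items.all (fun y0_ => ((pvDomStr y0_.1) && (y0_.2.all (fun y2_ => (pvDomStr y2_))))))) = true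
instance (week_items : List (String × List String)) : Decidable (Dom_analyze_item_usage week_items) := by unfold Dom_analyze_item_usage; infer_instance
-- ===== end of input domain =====

-- B replaces A's defaultdict item->days index by one rescan of week_items per distinct item
-- (alternative decomposition, same return value; not claimed faster).

-- ===== PORT A =====
-- defaultdict(list): item_usage[item].append(day)  ==  d[item] = d.get(item, []) + [day]  ==  Dict.modify
-- days[0] under the `len(days) == 1` guard is the list head (headI).
def analyze_item_usage (week_items : List (String × List String)) : (List (String × String)) × (List (String × List String)) :=
  let item_usage : PySem.Dict String (List String) :=
    week_items.foldl
      (fun d p => p.2.foldl (fun d item => d.modify item [] (fun l => l ++ [p.1])) d)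
      PySem.Dict.empty
  let res :=
    item_usage.items.foldl
      (fun (acc : PySem.Dict String String × PySem.Dict String (List String)) p =>
        if p.2.length == 1 then (acc.1.insert p.1 p.2.headI, acc.2)
        else (acc.1, acc.2.insert p.1 p.2))
      (PySem.Dict.empty, PySem.Dict.empty)
  (res.1.items, res.2.items)

-- ===== PORT B =====
-- dict.fromkeys over the flattened items = PySem.List.dedup; the per-item comprehension
-- [day for day, items in ... for it in items if it == item] is the flatMap/filter/map below.
def analyze_item_usage_alt (week_items : List (String × List String)) : (List (String × String)) × (List (String × List String)) :=
  let ordered := PySem.List.dedup (week_items.flatMap (fun p => p.2))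
  let res :=
    ordered.foldl
      (fun (acc : PySem.Dict String String × PySem.Dict String (List String)) item =>
        let days := week_items.flatMap (fun p => (p.2.filter (fun it => it == item)).map (fun _ => p.1))
        if days.length == 1 then (acc.1.insert item days.headI, acc.2)
        else (acc.1, acc.2.insert item days))
      (PySem.Dict.empty, PySem.Dict.empty)
  (res.1.items, res.2.items)

-- ===== PRECONDITION & SPEC =====
-- Pre_ excludes association lists with duplicate day keys: Python's A takes `week_items` as a
-- dict, whose keys are necessarily distinct, so such lists do not represent any Python input.
def Pre_analyze_item_usage (week_items : List (String × List String)) : Prop :=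
  (week_items.map (fun p => p.1)).Nodup
instance (week_items : List (String × List String)) : Decidable (Pre_analyze_item_usage week_items) := by unfold Pre_analyze_item_usage; infer_instance
def pvWitness_analyze_item_usage : (List (String × List String)) :=
  [("mon", ["pen", "cup"]), ("tue", ["pen"]), ("wed", [])]
def Spec_analyze_item_usage (week_items : List (String × List String)) (out : (List (String × String)) × (List (String × List String))) : Prop := out = analyze_item_usage_alt week_items
instance (week_items : List (String × List String)) (out : (List (String × String)) × (List (String × List String))) : Decidable (Spec_analyze_item_usage week_items out) := by unfold Spec_analyze_item_usage; infer_instance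

-- ===== CLAIM (what is proved, stated in full; the proofs are below) =====
def Claim_equal_analyze_item_usage : Prop := ∀ (week_items : List (String × List String)), Dom_analyze_item_usage week_items → Pre_analyze_item_usage week_items → Spec_analyze_item_usage week_items (analyze_item_usage week_items)

-- ===== LEMMAS AND PROOFS =====

-- the (item, day) pairs of week_items, flattened in traversal order
def pvFlat (week_items : List (String × List String)) : List (String × String) :=
  week_items.flatMap (fun p => p.2.map (fun it => (it, p.1)))

-- A's nested loops build the same dict as one fold over the flattened pairs
theorem pvNestedEqFlat (week_items : List (String × List String))
    (d : PySem.Dict String (List String)) :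
    week_items.foldl
      (fun d p => p.2.foldl (fun d item => d.modify item [] (fun l => l ++ [p.1])) d) d
    = (pvFlat week_items).foldl (fun d q => d.modify q.1 [] (fun l => l ++ [q.2])) d := by
  induction week_items generalizing d with
  | nil => rfl
  | cons p rest ih =>
      simp only [pvFlat, List.flatMap_cons, List.foldl_cons, List.foldl_append, List.foldl_map]
      rw [ih]
      rfl

theorem pvFlat_map_fst (week_items : List (String × List String)) :
    (pvFlat week_items).map (fun q => q.1) = week_items.flatMap (fun p => p.2) := by
  simp [pvFlat, List.map_flatMap, Function.comp_def]

theorem pvFlat_days (week_items : List (String × List String)) (k : String) :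
    ((pvFlat week_items).filter (fun q => q.1 == k)).map (fun q => q.2)
    = week_items.flatMap (fun p => (p.2.filter (fun it => it == k)).map (fun _ => p.1)) := by
  induction week_items with
  | nil => rfl
  | cons p rest ih =>
      simp only [pvFlat, List.flatMap_cons, List.filter_append, List.map_append] at *
      rw [ih]
      simp [List.filter_map, List.map_map, Function.comp_def]

-- A's item_usage, listed as items, is exactly B's (item, days) stream
theorem pvItemsEq (week_items : List (String × List String)) :
    (week_items.foldl
      (fun d p => p.2.foldl (fun d item => d.modify item [] (fun l => l ++ [p.1])) d)
      (PySem.Dict.empty : PySem.Dict String (List String))).items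
    = (PySem.List.dedup (week_items.flatMap (fun p => p.2))).map
        (fun k => (k, week_items.flatMap (fun p => (p.2.filter (fun it => it == k)).map (fun _ => p.1)))) := by
  rw [pvNestedEqFlat]
  have hnd : ((pvFlat week_items).foldl (fun d q => d.modify q.1 [] (fun l => l ++ [q.2]))
      (PySem.Dict.empty : PySem.Dict String (List String))).keys.Nodup := by
    exact PySem.Dict.nodup_keys_foldl_modify_key (pvFlat week_items) (fun q => q.1) []
      (fun _ q => fun l => l ++ [q.2]) PySem.Dict.empty PySem.Dict.nodup_keys_empty
  rw [PySem.Dict.items_eq_map_keys _ hnd []]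
  have hkeys : ((pvFlat week_items).foldl (fun d q => d.modify q.1 [] (fun l => l ++ [q.2]))
      (PySem.Dict.empty : PySem.Dict String (List String))).keys
      = PySem.List.dedup (week_items.flatMap (fun p => p.2)) := by
    rw [PySem.Dict.keys_foldl_modify_key (pvFlat week_items) (fun q => q.1) []
      (fun _ q => fun l => l ++ [q.2]) PySem.Dict.empty]
    rw [pvFlat_map_fst]
    rfl
  rw [hkeys]
  apply List.map_congr_left
  intro k _
  rw [PySem.Dict.getD_foldl_modify_append (pvFlat week_items) PySem.Dict.empty k]
  rw [PySem.Dict.getD_empty, List.nil_append, pvFlat_days]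

-- ===== VERDICT (by name: the statement is the Claim_ definition above) =====
theorem analyze_item_usage_spec : Claim_equal_analyze_item_usage := by
  intro week_items _ _
  unfold Spec_analyze_item_usage analyze_item_usage analyze_item_usage_alt
  simp only [pvItemsEq, List.foldl_map]
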